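-- pv_equiv track=rewrite | github.com/guci314/mda | pim-compiler/agent_cli/file_content_manager.py | _merge_imports
-- ===== SOURCE A (Python) =====
-- from typing import Dict, List, Optional, Tuple
--
-- def _merge_imports(imports1: List[str], imports2: List[str]) -> str:
--     """合并导入语句"""
--     all_imports = set(imports1) | set(imports2)
--
--     # 分组排序
--     standard_imports = []
--     third_party_imports = []
--     local_imports = []
--
--     for imp in sorted(all_imports):
--         if imp.startswith('from .') or imp.startswith('import .'):
--             local_imports.append(imp)
--         elif any(imp.startswith(f'from {lib}') or imp.startswith(f'import {lib}')
--                 for lib in ['os', 'sys', 'json', 'typing', 're', 'logging']):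
--             standard_imports.append(imp)
--         else:
--             third_party_imports.append(imp)
--
--     # 组合
--     result = []
--     if standard_imports:
--         result.extend(standard_imports)
--     if third_party_imports:
--         if result:
--             result.append('')
--         result.extend(third_party_imports)
--     if local_imports:
--         if result:
--             result.append('')
--         result.extend(local_imports)
--
--     return '\n'.join(result)
-- ===== SOURCE B (Python) =====
-- def _merge_imports(imports1, imports2):
--     """Merge import statements: one sort by composite key (category, text), then a
--     single scan inserting a blank line whenever the category changes."""
--     def category(imp):
--         if imp.startswith('from .') or imp.startswith('import .'):
--             return 2
--         if any(imp.startswith('from ' + lib) or imp.startswith('import ' + lib)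
--                for lib in ['os', 'sys', 'json', 'typing', 're', 'logging']):
--             return 0
--         return 1
--     items = sorted(set(imports1) | set(imports2), key=lambda imp: (category(imp), imp))
--     lines = []
--     prev = None
--     for imp in items:
--         c = category(imp)
--         if prev is not None and c != prev:
--             lines.append('')
--         lines.append(imp)
--         prev = c
--     return '\n'.join(lines)
-- ===== Notes on version B (the rewrite author's own statement) =====
-- stated objective: alternative
-- what changed: A sorts the deduped set lexicographically, partitions it into three category lists in a classify pass, and assembles them with stateful conditional '' separators; B instead does one sort by the composite key (category, text) — the key is injective, so the set's iteration order cannot matter — and a single linear scan that emits a blank line exactly when the category changes.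
import Mathlib
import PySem

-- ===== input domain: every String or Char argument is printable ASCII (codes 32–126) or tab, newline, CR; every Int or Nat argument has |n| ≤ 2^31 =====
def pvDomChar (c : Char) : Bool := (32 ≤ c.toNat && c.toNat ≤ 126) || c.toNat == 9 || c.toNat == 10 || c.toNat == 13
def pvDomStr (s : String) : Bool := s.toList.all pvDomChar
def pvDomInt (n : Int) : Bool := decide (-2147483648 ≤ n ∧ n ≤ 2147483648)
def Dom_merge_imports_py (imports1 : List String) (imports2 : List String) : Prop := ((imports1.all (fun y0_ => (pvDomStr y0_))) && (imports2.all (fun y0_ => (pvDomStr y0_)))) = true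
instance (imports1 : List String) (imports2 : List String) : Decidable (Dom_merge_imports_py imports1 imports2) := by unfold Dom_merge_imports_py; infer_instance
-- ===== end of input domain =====

-- B replaces A's global-sort + three-way classify pass + stateful separator assembly by
-- ONE sort under the composite key (category, text) followed by a single linear scan that
-- emits a blank line exactly where the category changes (alternative algorithm, same cost).


-- ===== PORT A =====
-- prefix tests shared by both Pythons (same literal prefix rules in Source A and Source B)
def pvIsLocal (imp : String) : Bool :=
  PySem.Str.startswith imp "from ." || PySem.Str.startswith imp "import ."

def pvIsStd (imp : String) : Bool :=
  (["os", "sys", "json", "typing", "re", "logging"] : List String).any (fun lib =>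
    PySem.Str.startswith imp ("from " ++ lib) || PySem.Str.startswith imp ("import " ++ lib))

def merge_imports_py (imports1 : List String) (imports2 : List String) : String :=
  let all_imports := PySem.Set.union (PySem.Set.ofList imports1) (PySem.Set.ofList imports2)
  let acc := (PySem.List.sorted all_imports (fun x => x) false).foldl
    (fun (acc : List String × List String × List String) imp =>
      if pvIsLocal imp then (acc.1, acc.2.1, acc.2.2 ++ [imp])
      else if pvIsStd imp then (acc.1 ++ [imp], acc.2.1, acc.2.2)
      else (acc.1, acc.2.1 ++ [imp], acc.2.2))
    ([], [], [])
  let standard_imports := acc.1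
  let third_party_imports := acc.2.1
  let local_imports := acc.2.2
  let result : List String := []
  let result := if standard_imports = [] then result else result ++ standard_imports
  let result := if third_party_imports = [] then result
    else (if result = [] then result else result ++ [""]) ++ third_party_imports
  let result := if local_imports = [] then result
    else (if result = [] then result else result ++ [""]) ++ local_imports
  PySem.Str.join "\n" result

-- ===== PORT B =====
-- Source B's category() helper (same prefix rules, as an integer rank)
def pvCategory (imp : String) : Int :=
  if pvIsLocal imp then 2 else if pvIsStd imp then 0 else 1

def merge_imports_py_alt (imports1 : List String) (imports2 : List String) : String :=
  let items := PySem.List.sorted2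
    (PySem.Set.union (PySem.Set.ofList imports1) (PySem.Set.ofList imports2))
    pvCategory (fun x => x) false
  let res := items.foldl
    (fun (st : List String × Option Int) imp =>
      let c := pvCategory imp
      ((match st.2 with
        | none => st.1
        | some p => if p == c then st.1 else st.1 ++ [""]) ++ [imp], some c))
    ([], none)
  PySem.Str.join "\n" res.1

-- ===== PRECONDITION & SPEC =====
def Spec_merge_imports_py (imports1 : List String) (imports2 : List String) (out : String) : Prop := out = merge_imports_py_alt imports1 imports2
instance (imports1 : List String) (imports2 : List String) (out : String) : Decidable (Spec_merge_imports_py imports1 imports2 out) := by unfold Spec_merge_imports_py; infer_instance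

-- ===== CLAIM (what is proved, stated in full; the proofs are below) =====
def Claim_equal_merge_imports_py : Prop := ∀ (imports1 : List String) (imports2 : List String), Dom_merge_imports_py imports1 imports2 → Spec_merge_imports_py imports1 imports2 (merge_imports_py imports1 imports2)

-- ===== LEMMAS AND PROOFS =====

-- the strict lexicographic "comes before" test of B's composite-key sort
def pvBfr (a b : String) : Bool :=
  decide (pvCategory a < pvCategory b) ||
    (!decide (pvCategory b < pvCategory a) && decide (a < b))

theorem pv_bfr_iff (a b : String) :
    pvBfr a b = true ↔
      (pvCategory a < pvCategory b ∨ (¬ pvCategory b < pvCategory a ∧ a < b)) := by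
  simp [pvBfr]

theorem pv_bfr_asymm {a b : String} (h : pvBfr a b = true) : pvBfr b a = false := by
  rw [pv_bfr_iff] at h
  rw [Bool.eq_false_iff, Ne, pv_bfr_iff]
  rcases h with h | ⟨h1, h2⟩
  · rintro (h' | ⟨h1', _⟩) <;> omega
  · rintro (h' | ⟨_, h2'⟩)
    · exact h1 h'
    · exact absurd h2 (lt_asymm h2')

theorem pv_bfr_trans {a b c : String} (h1 : pvBfr a b = true) (h2 : pvBfr b c = true) :
    pvBfr a c = true := by
  rw [pv_bfr_iff] at h1 h2 ⊢
  rcases h1 with h1 | ⟨h1a, h1b⟩ <;> rcases h2 with h2 | ⟨h2a, h2b⟩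
  · left; omega
  · left; omega
  · left; omega
  · right; exact ⟨by omega, lt_trans h1b h2b⟩

theorem pv_bfr_total {a b : String} (h : a ≠ b) : pvBfr a b = true ∨ pvBfr b a = true := by
  rw [pv_bfr_iff, pv_bfr_iff]
  rcases lt_trichotomy (pvCategory a) (pvCategory b) with hc | hc | hc
  · exact Or.inl (Or.inl hc)
  · rcases lt_or_gt_of_ne h with hs | hs
    · exact Or.inl (Or.inr ⟨by omega, hs⟩)
    · exact Or.inr (Or.inr ⟨by omega, hs⟩)
  · exact Or.inr (Or.inl hc)

-- inserting with pvBfr preserves the "no later element comes before an earlier one" invariant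
theorem pv_insertBy_pw (x : String) (ys : List String)
    (h : ys.Pairwise (fun a b => pvBfr b a = false)) :
    (PySem.List.insertBy pvBfr x ys).Pairwise (fun a b => pvBfr b a = false) := by
  induction ys with
  | nil => simp [PySem.List.insertBy]
  | cons y ys ih =>
    rw [List.pairwise_cons] at h
    by_cases hb : pvBfr x y = true
    · simp only [PySem.List.insertBy, hb, if_true]
      refine List.Pairwise.cons ?_ (List.Pairwise.cons h.1 h.2)
      intro z hz
      rcases List.mem_cons.mp hz with rfl | hz'
      · exact pv_bfr_asymm hb
      · rw [Bool.eq_false_iff, Ne]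
        intro hzx
        have := pv_bfr_trans hzx hb
        rw [h.1 z hz'] at this
        exact Bool.false_ne_true this
    · simp only [PySem.List.insertBy, hb]
      refine List.Pairwise.cons ?_ (ih h.2)
      intro z hz
      rcases (PySem.List.mem_insertBy pvBfr x z ys).mp hz with rfl | hz'
      · exact Bool.eq_false_iff.mpr hb
      · exact h.1 z hz'

theorem pv_foldl_insertBy_pw (l : List String) (acc : List String)
    (h : acc.Pairwise (fun a b => pvBfr b a = false)) :
    (l.foldl (fun acc x => PySem.List.insertBy pvBfr x acc) acc).Pairwise
      (fun a b => pvBfr b a = false) := by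
  induction l generalizing acc with
  | nil => exact h
  | cons x xs ih => exact ih _ (pv_insertBy_pw x acc h)

theorem pv_sorted2_run (xs : List String) :
    PySem.List.sorted2 xs pvCategory (fun x => x) false
      = xs.foldl (fun acc x => PySem.List.insertBy pvBfr x acc) [] := rfl

theorem pv_strict_of_pw {l : List String}
    (h : l.Pairwise (fun a b => pvBfr b a = false)) (hn : l.Nodup) :
    l.Pairwise (fun a b => pvBfr a b = true) := by
  refine (h.and hn).imp ?_
  rintro a b ⟨hf, hne⟩
  rcases pv_bfr_total hne with ht | ht
  · exact ht
  · rw [hf] at ht; exact absurd ht Bool.false_ne_true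

theorem pv_eq_of_perm {l1 l2 : List String} (hp : l1.Perm l2)
    (h1 : l1.Pairwise (fun a b => pvBfr a b = true))
    (h2 : l2.Pairwise (fun a b => pvBfr a b = true)) : l1 = l2 :=
  List.Perm.eq_of_pairwise
    (fun a b _ _ hab hba => absurd hba (by simp [pv_bfr_asymm hab])) h1 h2 hp

-- A's classify-loop is three filters of its input list
theorem pv_fold_classify (l : List String) (a b c : List String) :
    l.foldl
      (fun (acc : List String × List String × List String) imp =>
        if pvIsLocal imp then (acc.1, acc.2.1, acc.2.2 ++ [imp])
        else if pvIsStd imp then (acc.1 ++ [imp], acc.2.1, acc.2.2)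
        else (acc.1, acc.2.1 ++ [imp], acc.2.2))
      (a, b, c)
    = (a ++ l.filter (fun imp => pvCategory imp == 0),
       b ++ l.filter (fun imp => pvCategory imp == 1),
       c ++ l.filter (fun imp => pvCategory imp == 2)) := by
  induction l generalizing a b c with
  | nil => simp
  | cons x xs ih =>
    simp only [List.foldl_cons, List.filter_cons]
    by_cases hl : pvIsLocal x = true
    · simp [pvCategory, hl, ih]
    · by_cases hs : pvIsStd x = true
      · simp [pvCategory, hl, hs, ih]
      · simp [pvCategory, hl, hs, ih]

theorem pv_cat_range (x : String) :
    pvCategory x = 0 ∨ pvCategory x = 1 ∨ pvCategory x = 2 := by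
  unfold pvCategory; split_ifs <;> simp

-- the three category filters of any list concatenate to a permutation of it
theorem pv_filters_perm (l : List String) :
    (l.filter (fun x => pvCategory x == 0) ++ l.filter (fun x => pvCategory x == 1)
      ++ l.filter (fun x => pvCategory x == 2)).Perm l := by
  have h0 := List.filter_append_perm (fun x => pvCategory x == 0) l
  have h1 := List.filter_append_perm (fun x => pvCategory x == 1)
    (l.filter (fun x => !(pvCategory x == 0)))
  rw [List.filter_filter, List.filter_filter] at h1
  have e1 : l.filter (fun x => pvCategory x == 1 && !(pvCategory x == 0))
      = l.filter (fun x => pvCategory x == 1) := by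
    apply List.filter_congr; intro x _
    rcases pv_cat_range x with h | h | h <;> simp [h]
  have e2 : l.filter (fun x => !(pvCategory x == 1) && !(pvCategory x == 0))
      = l.filter (fun x => pvCategory x == 2) := by
    apply List.filter_congr; intro x _
    rcases pv_cat_range x with h | h | h <;> simp [h]
  rw [e1, e2] at h1
  rw [List.append_assoc]
  exact (List.Perm.append_left _ h1).trans h0

theorem pv_cat_of_mem_filter {l : List String} {c : Int} {x : String}
    (h : x ∈ l.filter (fun y => pvCategory y == c)) : pvCategory x = c := by
  have := (List.mem_filter.mp h).2
  simpa using this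

-- each category filter of the sorted deduped list is strictly pvBfr-increasing
theorem pv_filter_pw (l : List String) (c : Int)
    (hle : l.Pairwise (fun a b => a ≤ b)) (hn : l.Nodup) :
    (l.filter (fun x => pvCategory x == c)).Pairwise (fun a b => pvBfr a b = true) := by
  have hp : (l.filter (fun x => pvCategory x == c)).Pairwise (fun a b => a ≤ b ∧ a ≠ b) :=
    (hle.and hn).filter _
  refine hp.imp_of_mem ?_
  intro a b ha hb ⟨hab, hne⟩
  rw [pv_bfr_iff]
  right
  rw [pv_cat_of_mem_filter ha, pv_cat_of_mem_filter hb]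
  exact ⟨lt_irrefl c, lt_of_le_of_ne hab hne⟩

-- B's sorted2 equals the concatenation of the three sorted category groups
theorem pv_sorted2_eq_groups (d : List String) (hn : d.Nodup) :
    PySem.List.sorted2 d pvCategory (fun x => x) false
      = (PySem.List.sorted d (fun x => x) false).filter (fun x => pvCategory x == 0)
        ++ (PySem.List.sorted d (fun x => x) false).filter (fun x => pvCategory x == 1)
        ++ (PySem.List.sorted d (fun x => x) false).filter (fun x => pvCategory x == 2) := by
  set S := PySem.List.sorted d (fun x => x) false with hS
  have hSperm : S.Perm d := PySem.List.sorted_perm d (fun x => x) false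
  have hSn : S.Nodup := (hSperm.nodup_iff).mpr hn
  have hSle : S.Pairwise (fun a b => a ≤ b) := PySem.List.sorted_pairwise d (fun x => x)
  -- left side: perm of d and strictly increasing
  have hlp : (PySem.List.sorted2 d pvCategory (fun x => x) false).Perm d :=
    PySem.List.sorted2_perm d pvCategory (fun x => x) false
  have hlpw : (PySem.List.sorted2 d pvCategory (fun x => x) false).Pairwise
      (fun a b => pvBfr a b = true) := by
    rw [pv_sorted2_run]
    exact pv_strict_of_pw (pv_foldl_insertBy_pw d [] (by simp))
      (((pv_sorted2_run d) ▸ hlp).nodup_iff.mpr hn)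
  -- right side: perm of d and strictly increasing
  have hrp : ((S.filter (fun x => pvCategory x == 0) ++ S.filter (fun x => pvCategory x == 1)
      ++ S.filter (fun x => pvCategory x == 2))).Perm d :=
    (pv_filters_perm S).trans hSperm
  have hrpw : ((S.filter (fun x => pvCategory x == 0) ++ S.filter (fun x => pvCategory x == 1)
      ++ S.filter (fun x => pvCategory x == 2))).Pairwise (fun a b => pvBfr a b = true) := by
    rw [List.append_assoc, List.pairwise_append]
    refine ⟨pv_filter_pw S 0 hSle hSn, ?_, ?_⟩
    · rw [List.pairwise_append]
      refine ⟨pv_filter_pw S 1 hSle hSn, pv_filter_pw S 2 hSle hSn, ?_⟩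
      intro a ha b hb
      rw [pv_bfr_iff]
      left
      rw [pv_cat_of_mem_filter ha, pv_cat_of_mem_filter hb]; omega
    · intro a ha b hb
      rw [pv_bfr_iff]
      left
      have hb' : pvCategory b = 1 ∨ pvCategory b = 2 := by
        rcases List.mem_append.mp hb with h | h
        · exact Or.inl (pv_cat_of_mem_filter h)
        · exact Or.inr (pv_cat_of_mem_filter h)
      rw [pv_cat_of_mem_filter ha]; omega
  rw [List.append_assoc] at hrpw hrp ⊢
  exact pv_eq_of_perm (hlp.trans hrp.symm) hlpw hrpw

-- B's scan over a block of constant category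
theorem pv_scan_block (l : List String) (c : Int) (hc : ∀ x ∈ l, pvCategory x = c)
    (hne : l ≠ []) (acc : List String) (p : Option Int) :
    l.foldl
      (fun (st : List String × Option Int) imp =>
        let c := pvCategory imp
        ((match st.2 with
          | none => st.1
          | some p => if p == c then st.1 else st.1 ++ [""]) ++ [imp], some c))
      (acc, p)
    = ((match p with
        | none => acc
        | some q => if q == c then acc else acc ++ [""]) ++ l, some c) := by
  induction l generalizing acc p with
  | nil => exact absurd rfl hne
  | cons x xs ih =>
    have hx : pvCategory x = c := hc x (List.mem_cons_self ..)
    rw [List.foldl_cons]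
    cases xs with
    | nil => simp [hx]
    | cons y ys =>
      have := ih (fun z hz => hc z (List.mem_cons_of_mem x hz)) (List.cons_ne_nil y ys)
        ((match p with
          | none => acc
          | some q => if q == c then acc else acc ++ [""]) ++ [x]) (some c)
      simp only [hx] at this ⊢
      rw [this]
      simp

-- A's assembly of the three groups (the let-chain of the port, as a function)
def pvAssemble (s t u : List String) : List String :=
  let result : List String := []
  let result := if s = [] then result else result ++ s
  let result := if t = [] then result
    else (if result = [] then result else result ++ [""]) ++ t
  let result := if u = [] then result
    else (if result = [] then result else result ++ [""]) ++ u
  result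

-- B's scan over the concatenated groups produces exactly A's assembled list
theorem pv_scan_assemble (s t u : List String)
    (hs : ∀ x ∈ s, pvCategory x = 0) (ht : ∀ x ∈ t, pvCategory x = 1)
    (hu : ∀ x ∈ u, pvCategory x = 2) :
    ((s ++ t ++ u).foldl
      (fun (st : List String × Option Int) imp =>
        let c := pvCategory imp
        ((match st.2 with
          | none => st.1
          | some p => if p == c then st.1 else st.1 ++ [""]) ++ [imp], some c))
      ([], none)).1
    = pvAssemble s t u := by
  rw [List.foldl_append, List.foldl_append]
  by_cases hse : s = [] <;> by_cases hte : t = [] <;> by_cases hue : u = [] <;>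
    simp only [hse, hte, hue, List.foldl_nil] <;>
    [skip; rw [pv_scan_block u 2 hu hue]; rw [pv_scan_block t 1 ht hte];
     rw [pv_scan_block t 1 ht hte, pv_scan_block u 2 hu hue];
     rw [pv_scan_block s 0 hs hse]; rw [pv_scan_block s 0 hs hse, pv_scan_block u 2 hu hue];
     rw [pv_scan_block s 0 hs hse, pv_scan_block t 1 ht hte];
     rw [pv_scan_block s 0 hs hse, pv_scan_block t 1 ht hte, pv_scan_block u 2 hu hue]] <;>
    simp [pvAssemble, hse, hte, hue]

-- ===== VERDICT (by name: the statement is the Claim_ definition above) =====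
theorem merge_imports_py_spec : Claim_equal_merge_imports_py := by
  intro imports1 imports2 _
  unfold Spec_merge_imports_py merge_imports_py merge_imports_py_alt
  dsimp only
  rw [pv_fold_classify]
  set d := PySem.Set.union (PySem.Set.ofList imports1) (PySem.Set.ofList imports2) with hd
  have hdn : d.Nodup := by
    rw [hd]
    exact PySem.Set.nodup_union _ _ (PySem.Set.nodup_ofList imports1)
  rw [pv_sorted2_eq_groups d hdn,
    pv_scan_assemble _ _ _ (fun x hx => pv_cat_of_mem_filter hx)
      (fun x hx => pv_cat_of_mem_filter hx) (fun x hx => pv_cat_of_mem_filter hx)]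
  simp [pvAssemble]
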